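-- pv_equiv track=rewrite | github.com/lichtbrenger/data_pipeline | reports/visualise/graph_cvss.py | count_cvss
-- ===== SOURCE A (Python) =====
-- def count_cvss(cvss_list):
--     low = 0
--     medium = 0
--     high = 0
--     critical = 0
--     for cvss in cvss_list:
--         match cvss:
--             case 'low':
--                 low += 1
--             case 'medium':
--                 medium += 1
--             case 'high':
--                 high += 1
--             case 'critical':
--                 critical += 1
--
--     return [low,medium,high,critical]
-- ===== SOURCE B (Python) =====
-- def count_cvss(cvss_list):
--     return [cvss_list.count('low'), cvss_list.count('medium'),
--             cvss_list.count('high'), cvss_list.count('critical')]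
-- ===== Notes on version B (the rewrite author's own statement) =====
-- stated objective: idiomatic
-- what changed: Replaces the single accumulator loop with four match branches by four independent list.count scans returned in fixed order.
import Mathlib
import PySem

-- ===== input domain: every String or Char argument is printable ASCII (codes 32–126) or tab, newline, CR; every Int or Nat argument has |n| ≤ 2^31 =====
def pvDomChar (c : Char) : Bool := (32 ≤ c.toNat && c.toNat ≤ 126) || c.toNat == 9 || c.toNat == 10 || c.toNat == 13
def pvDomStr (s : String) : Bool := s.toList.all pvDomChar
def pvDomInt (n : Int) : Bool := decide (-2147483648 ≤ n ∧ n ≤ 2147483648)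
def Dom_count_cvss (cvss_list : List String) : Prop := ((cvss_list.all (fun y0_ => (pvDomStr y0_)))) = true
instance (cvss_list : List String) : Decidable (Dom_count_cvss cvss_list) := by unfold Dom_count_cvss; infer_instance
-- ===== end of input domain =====

-- B replaces A's single accumulator loop (four match branches) by four independent count scans (idiomatic).

-- ===== PORT A =====
-- step body of A's loop: match on the string, bump the matching accumulator
def countCvssStep (st : Int × Int × Int × Int) (cvss : String) : Int × Int × Int × Int :=
  if cvss = "low" then (st.1 + 1, st.2.1, st.2.2.1, st.2.2.2)
  else if cvss = "medium" then (st.1, st.2.1 + 1, st.2.2.1, st.2.2.2)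
  else if cvss = "high" then (st.1, st.2.1, st.2.2.1 + 1, st.2.2.2)
  else if cvss = "critical" then (st.1, st.2.1, st.2.2.1, st.2.2.2 + 1)
  else st

def count_cvss (cvss_list : List String) : List Int :=
  let st := cvss_list.foldl countCvssStep (0, 0, 0, 0)
  [st.1, st.2.1, st.2.2.1, st.2.2.2]

-- ===== PORT B =====
def count_cvss_alt (cvss_list : List String) : List Int :=
  [PySem.List.count cvss_list "low", PySem.List.count cvss_list "medium",
   PySem.List.count cvss_list "high", PySem.List.count cvss_list "critical"]

-- ===== PRECONDITION & SPEC =====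
def Spec_count_cvss (cvss_list : List String) (out : List Int) : Prop := out = count_cvss_alt cvss_list
instance (cvss_list : List String) (out : List Int) : Decidable (Spec_count_cvss cvss_list out) := by unfold Spec_count_cvss; infer_instance

-- ===== CLAIM (what is proved, stated in full; the proofs are below) =====
def Claim_equal_count_cvss : Prop := ∀ (cvss_list : List String), Dom_count_cvss cvss_list → Spec_count_cvss cvss_list (count_cvss cvss_list)

-- ===== LEMMAS AND PROOFS =====
-- loop invariant: folding A's step from any start adds the four counts componentwise
lemma countCvss_foldl (l : List String) (a b c d : Int) :
    l.foldl countCvssStep (a, b, c, d) =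
      (a + PySem.List.count l "low", b + PySem.List.count l "medium",
       c + PySem.List.count l "high", d + PySem.List.count l "critical") := by
  induction l generalizing a b c d with
  | nil => simp [PySem.List.count]
  | cons x xs ih =>
    simp only [List.foldl, countCvssStep]
    split_ifs with h1 h2 h3 h4 <;>
      simp_all [PySem.List.count] <;> ring

-- ===== VERDICT (by name: the statement is the Claim_ definition above) =====
theorem count_cvss_spec : Claim_equal_count_cvss := by
  intro l _
  show _ = _
  simp [count_cvss, count_cvss_alt, countCvss_foldl]
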